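-- pv_equiv track=rewrite | github.com/johnmiddleton12/cc_builder | lib/paths_to_instructions.py | generate_ptp_instructions
-- ===== SOURCE A (Python) =====
-- def generate_direction_instruction(direction, correct_direction):
--     """Generates instructions to turn from one direction to another
--
--     Parameters:
--     direction (int): The current direction
--     correct_direction (int): The direction to turn to
--
--     Returns:
--     list: A list of instructions to turn from one direction to another
--     """
--
--     instructions = []
--
--     if direction == correct_direction:
--         return instructions
--
--     if direction == 0:
--         if correct_direction == 1:
--             instructions.append("turnRight()")
--         elif correct_direction == 2:
--             instructions.append("turnRight()")
--             instructions.append("turnRight()")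
--         elif correct_direction == 3:
--             instructions.append("turnLeft()")
--     elif direction == 1:
--         if correct_direction == 0:
--             instructions.append("turnLeft()")
--         elif correct_direction == 2:
--             instructions.append("turnRight()")
--         elif correct_direction == 3:
--             instructions.append("turnRight()")
--             instructions.append("turnRight()")
--     elif direction == 2:
--         if correct_direction == 0:
--             instructions.append("turnRight()")
--             instructions.append("turnRight()")
--         elif correct_direction == 1:
--             instructions.append("turnLeft()")
--         elif correct_direction == 3:
--             instructions.append("turnRight()")
--     elif direction == 3:
--         if correct_direction == 0:
--             instructions.append("turnRight()")
--         elif correct_direction == 1: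
--             instructions.append("turnRight()")
--             instructions.append("turnRight()")
--         elif correct_direction == 2:
--             instructions.append("turnLeft()")
--
--     return instructions
--
-- def generate_ptp_instructions(a, b, direction):
--     """Generate point to point instructions for the turtle to follow
--
--     Parameters:
--     a (tuple): a tuple representing the starting point
--     b (tuple): a tuple representing the ending point
--     direction (int): the direction the turtle is facing
--
--     Returns:
--     list: a list of instructions for the turtle to follow
--     int: the direction the turtle is facing after the instructions are executed
--     """
--     instructions = []
--
--     # Correct x coordinate first
--     # face right direction
--
--     if a[0] < b[0]:
--         # face east
--         instructions.extend(generate_direction_instruction(direction, 1))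
--         direction = 1
--     elif a[0] > b[0]:
--         # face west
--         instructions.extend(generate_direction_instruction(direction, 3))
--         direction = 3
--
--     # move to correct x coordinate
--     for i in range(abs(a[0] - b[0])):
--         instructions.append("forward()")
--
--     # Correct y coordinate
--     # face right direction
--
--     if a[1] < b[1]:
--         # face south
--         instructions.extend(generate_direction_instruction(direction, 2))
--         direction = 2
--     elif a[1] > b[1]:
--         # face north
--         instructions.extend(generate_direction_instruction(direction, 0))
--         direction = 0
--
--     # move to correct y coordinate
--     for i in range(abs(a[1] - b[1])):
--         instructions.append("forward()")
--
--     return instructions, direction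
-- ===== SOURCE B (Python) =====
-- def generate_ptp_instructions(a, b, direction):
--     TURNS = ([], ["turnRight()"], ["turnRight()", "turnRight()"], ["turnLeft()"])
--
--     def emit_turns(d, t):
--         if d != t and d in (0, 1, 2, 3):
--             return TURNS[(t - d) % 4]
--         return []
--
--     instructions = []
--     x, y = a
--     bx, by = b
--     # walk cell by cell: at each step face the needed axis direction, then step
--     while x != bx or y != by:
--         if x != bx:
--             if bx > x:
--                 instructions += emit_turns(direction, 1) + ["forward()"]
--                 direction = 1
--                 x += 1
--             else:
--                 instructions += emit_turns(direction, 3) + ["forward()"]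
--                 direction = 3
--                 x -= 1
--         elif by > y:
--             instructions += emit_turns(direction, 2) + ["forward()"]
--             direction = 2
--             y += 1
--         else:
--             instructions += emit_turns(direction, 0) + ["forward()"]
--             direction = 0
--             y -= 1
--     return instructions, direction
-- ===== Notes on version B (the rewrite author's own statement) =====
-- stated objective: alternative
-- what changed: Replaced A's staged plan (turn via a 16-case table, emit |dx| forwards, turn again, emit |dy| forwards) by a cell-by-cell grid walk: a single loop that, at each step, faces the axis direction still needed (turns computed by a closed-form (target-direction)%4 lookup, only for in-range directions) and steps one unit, until the target cell is reached.
import Mathlib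
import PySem

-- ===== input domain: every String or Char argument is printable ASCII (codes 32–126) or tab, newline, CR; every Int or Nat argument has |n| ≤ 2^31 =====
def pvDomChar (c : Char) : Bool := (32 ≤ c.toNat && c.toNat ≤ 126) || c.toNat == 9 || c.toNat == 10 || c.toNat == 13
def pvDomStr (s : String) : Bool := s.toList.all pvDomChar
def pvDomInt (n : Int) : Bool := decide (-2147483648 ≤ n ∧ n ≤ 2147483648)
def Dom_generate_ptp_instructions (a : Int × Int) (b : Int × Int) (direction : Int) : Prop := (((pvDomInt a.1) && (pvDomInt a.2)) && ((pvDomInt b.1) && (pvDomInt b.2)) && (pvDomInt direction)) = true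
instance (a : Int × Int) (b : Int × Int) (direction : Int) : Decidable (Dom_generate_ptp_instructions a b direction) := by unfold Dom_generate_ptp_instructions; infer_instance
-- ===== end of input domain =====

-- B replaces A's staged plan (turn table, then |dx| forwards, turn table, then |dy| forwards)
-- by a cell-by-cell walk of the grid that turns and steps one unit at a time (objective: alternative; same cost).

-- ===== PORT A =====
-- transliteration of generate_direction_instruction (nested-if table, appends in order)
def generate_direction_instruction (direction correct_direction : Int) : List String :=
  let instructions : List String := []
  if direction == correct_direction then instructions
  else
    if direction == 0 then
      if correct_direction == 1 then instructions ++ ["turnRight()"]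
      else if correct_direction == 2 then instructions ++ ["turnRight()"] ++ ["turnRight()"]
      else if correct_direction == 3 then instructions ++ ["turnLeft()"]
      else instructions
    else if direction == 1 then
      if correct_direction == 0 then instructions ++ ["turnLeft()"]
      else if correct_direction == 2 then instructions ++ ["turnRight()"]
      else if correct_direction == 3 then instructions ++ ["turnRight()"] ++ ["turnRight()"]
      else instructions
    else if direction == 2 then
      if correct_direction == 0 then instructions ++ ["turnRight()"] ++ ["turnRight()"]
      else if correct_direction == 1 then instructions ++ ["turnLeft()"]
      else if correct_direction == 3 then instructions ++ ["turnRight()"]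
      else instructions
    else if direction == 3 then
      if correct_direction == 0 then instructions ++ ["turnRight()"]
      else if correct_direction == 1 then instructions ++ ["turnRight()"] ++ ["turnRight()"]
      else if correct_direction == 2 then instructions ++ ["turnLeft()"]
      else instructions
    else instructions

def generate_ptp_instructions (a : Int × Int) (b : Int × Int) (direction : Int) : List String × Int :=
  let instructions : List String := []
  -- correct x coordinate: face east/west
  let instructions :=
    if a.1 < b.1 then instructions ++ generate_direction_instruction direction 1
    else if a.1 > b.1 then instructions ++ generate_direction_instruction direction 3
    else instructions
  let direction := if a.1 < b.1 then (1 : Int) else if a.1 > b.1 then (3 : Int) else direction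
  -- for i in range(abs(a[0]-b[0])): instructions.append("forward()")
  let instructions := (PySem.List.pyRange 0 |a.1 - b.1| 1).foldl (fun acc _ => acc ++ ["forward()"]) instructions
  -- correct y coordinate: face south/north
  let instructions :=
    if a.2 < b.2 then instructions ++ generate_direction_instruction direction 2
    else if a.2 > b.2 then instructions ++ generate_direction_instruction direction 0
    else instructions
  let direction := if a.2 < b.2 then (2 : Int) else if a.2 > b.2 then (0 : Int) else direction
  let instructions := (PySem.List.pyRange 0 |a.2 - b.2| 1).foldl (fun acc _ => acc ++ ["forward()"]) instructions
  (instructions, direction)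

-- ===== PORT B =====
-- Source B's TURNS tuple
def pvTurnTab : List (List String) := [[], ["turnRight()"], ["turnRight()", "turnRight()"], ["turnLeft()"]]

-- Source B's emit_turns helper: closed-form (t - d) % 4 lookup, only for in-range current direction
def pvEmitTurns (d t : Int) : List String :=
  if d ≠ t ∧ (d = 0 ∨ d = 1 ∨ d = 2 ∨ d = 3) then
    (PySem.List.pyGet? pvTurnTab (PySem.Int.mod (t - d) 4)).getD []
  else []

-- Source B's while loop: walk cell by cell, turning and stepping one unit at a time.
-- Structural recursion on fuel = remaining Manhattan distance (a pure totality guard: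
-- the loop runs exactly that many iterations).
def pvWalkF (fuel : Nat) (bx byy x y d : Int) (acc : List String) : List String × Int :=
  match fuel with
  | 0 => (acc, d)
  | fuel + 1 =>
    if x ≠ bx then
      if bx > x then
        pvWalkF fuel bx byy (x + 1) y 1 (acc ++ (pvEmitTurns d 1 ++ ["forward()"]))
      else
        pvWalkF fuel bx byy (x - 1) y 3 (acc ++ (pvEmitTurns d 3 ++ ["forward()"]))
    else if y ≠ byy then
      if byy > y then
        pvWalkF fuel bx byy x (y + 1) 2 (acc ++ (pvEmitTurns d 2 ++ ["forward()"]))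
      else
        pvWalkF fuel bx byy x (y - 1) 0 (acc ++ (pvEmitTurns d 0 ++ ["forward()"]))
    else (acc, d)

def generate_ptp_instructions_alt (a : Int × Int) (b : Int × Int) (direction : Int) : List String × Int :=
  pvWalkF ((b.1 - a.1).natAbs + (b.2 - a.2).natAbs) b.1 b.2 a.1 a.2 direction []

-- ===== PRECONDITION & SPEC =====
def Spec_generate_ptp_instructions (a : Int × Int) (b : Int × Int) (direction : Int) (out : List String × Int) : Prop := out = generate_ptp_instructions_alt a b direction
instance (a : Int × Int) (b : Int × Int) (direction : Int) (out : List String × Int) : Decidable (Spec_generate_ptp_instructions a b direction out) := by unfold Spec_generate_ptp_instructions; infer_instance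

-- ===== CLAIM (what is proved, stated in full; the proofs are below) =====
def Claim_equal_generate_ptp_instructions : Prop := ∀ (a : Int × Int) (b : Int × Int) (direction : Int), Dom_generate_ptp_instructions a b direction → Spec_generate_ptp_instructions a b direction (generate_ptp_instructions a b direction)

-- ===== LEMMAS AND PROOFS =====

-- A's turn table agrees with B's emit_turns whenever the target is a real direction
theorem turns_eq (d t : Int) (ht : t = 0 ∨ t = 1 ∨ t = 2 ∨ t = 3) :
    generate_direction_instruction d t = pvEmitTurns d t := by
  by_cases h0 : d = 0
  · subst h0; rcases ht with h | h | h | h <;> subst h <;> decide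
  · by_cases h1 : d = 1
    · subst h1; rcases ht with h | h | h | h <;> subst h <;> decide
    · by_cases h2 : d = 2
      · subst h2; rcases ht with h | h | h | h <;> subst h <;> decide
      · by_cases h3 : d = 3
        · subst h3; rcases ht with h | h | h | h <;> subst h <;> decide
        · have hdt : d ≠ t := by rcases ht with h | h | h | h <;> omega
          simp [generate_direction_instruction, pvEmitTurns, h0, h1, h2, h3, hdt]

-- the append-one-per-iteration loop is list replication
theorem foldl_append_replicate {α : Type} (x : α) (l : List Int) (acc : List α) :
    l.foldl (fun acc _ => acc ++ [x]) acc = acc ++ List.replicate l.length x := by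
  induction l generalizing acc with
  | nil => simp
  | cons h t ih =>
      simp only [List.foldl, ih]
      rw [List.length_cons, List.replicate_succ', List.append_assoc]
      congr 1
      rw [List.singleton_append, ← List.replicate_succ, List.replicate_succ']

theorem forward_loop_eq (n : Int) (acc : List String) :
    (PySem.List.pyRange 0 n 1).foldl (fun acc _ => acc ++ ["forward()"]) acc
      = acc ++ List.replicate n.toNat "forward()" := by
  rw [foldl_append_replicate, PySem.List.length_pyRange_one]
  norm_num

theorem pvWalkF_zero (bx byy x y d : Int) (acc : List String) :
    pvWalkF 0 bx byy x y d acc = (acc, d) := rfl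

theorem pvWalkF_x_run (bx byy y t : Int) (n rest : Nat)
    (x : Int) (hn : (bx - x).natAbs = n)
    (hdir : (bx > x → t = 1) ∧ (x > bx → t = 3)) (acc : List String) :
    pvWalkF (n + rest) bx byy x y t acc
      = pvWalkF rest bx byy bx y t (acc ++ List.replicate n "forward()") := by
  induction n generalizing x acc with
  | zero =>
      have : x = bx := by omega
      subst this; simp
  | succ m ih =>
      have hxne : x ≠ bx := by omega
      rw [show m + 1 + rest = (m + rest) + 1 by omega]
      by_cases hgt : bx > x
      · have ht : t = 1 := hdir.1 hgt
        subst ht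
        rw [pvWalkF, if_pos hxne, if_pos hgt]
        simp only [show pvEmitTurns 1 1 = [] from by decide, List.nil_append]
        rw [ih (x + 1) (by omega) ⟨fun _ => rfl, fun h => by omega⟩]
        congr 1
        simp [List.replicate_succ, List.append_assoc]
      · have hlt : x > bx := by omega
        have ht : t = 3 := hdir.2 hlt
        subst ht
        rw [pvWalkF, if_pos hxne, if_neg hgt]
        simp only [show pvEmitTurns 3 3 = [] from by decide, List.nil_append]
        rw [ih (x - 1) (by omega) ⟨fun h => by omega, fun _ => rfl⟩]
        congr 1
        simp [List.replicate_succ, List.append_assoc]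

-- entering the x-phase: one turn burst, then |bx - x| forwards, ending at x = bx facing t
theorem pvWalkF_x (bx byy x y d : Int) (rest : Nat) (acc : List String) (hx : x ≠ bx) :
    pvWalkF ((bx - x).natAbs + rest) bx byy x y d acc =
      pvWalkF rest bx byy bx y (if bx > x then 1 else 3)
        (acc ++ pvEmitTurns d (if bx > x then 1 else 3)
             ++ List.replicate (bx - x).natAbs "forward()") := by
  by_cases hgt : bx > x
  · simp only [if_pos hgt]
    rw [show (bx - x).natAbs + rest = ((bx - (x + 1)).natAbs + rest) + 1 by omega,
      pvWalkF, if_pos hx, if_pos hgt,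
      pvWalkF_x_run bx byy y 1 ((bx - (x + 1)).natAbs) rest (x + 1) rfl
        ⟨fun _ => rfl, fun h => by omega⟩]
    congr 1
    rw [show (bx - x).natAbs = (bx - (x + 1)).natAbs + 1 by omega]
    simp [List.replicate_succ, List.append_assoc]
  · simp only [if_neg hgt]
    rw [show (bx - x).natAbs + rest = ((bx - (x - 1)).natAbs + rest) + 1 by omega,
      pvWalkF, if_pos hx, if_neg hgt,
      pvWalkF_x_run bx byy y 3 ((bx - (x - 1)).natAbs) rest (x - 1) rfl
        ⟨fun h => by omega, fun _ => rfl⟩]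
    congr 1
    rw [show (bx - x).natAbs = (bx - (x - 1)).natAbs + 1 by omega]
    simp [List.replicate_succ, List.append_assoc]

-- straight y-run at x = bx, with exactly the remaining fuel
theorem pvWalkF_y_run (bx byy : Int) (t : Int) (n : Nat)
    (y : Int) (hn : (byy - y).natAbs = n)
    (hdir : (byy > y → t = 2) ∧ (y > byy → t = 0)) (acc : List String) :
    pvWalkF n bx byy bx y t acc = (acc ++ List.replicate n "forward()", t) := by
  induction n generalizing y acc with
  | zero => simp [pvWalkF]
  | succ m ih =>
      have hyne : y ≠ byy := by omega
      by_cases hgt : byy > y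
      · have ht : t = 2 := hdir.1 hgt
        subst ht
        rw [pvWalkF, if_neg (show ¬ bx ≠ bx by omega), if_pos hyne, if_pos hgt]
        simp only [show pvEmitTurns 2 2 = [] from by decide, List.nil_append]
        rw [ih (y + 1) (by omega) ⟨fun _ => rfl, fun h => by omega⟩]
        simp [List.replicate_succ, List.append_assoc]
      · have hlt : y > byy := by omega
        have ht : t = 0 := hdir.2 hlt
        subst ht
        rw [pvWalkF, if_neg (show ¬ bx ≠ bx by omega), if_pos hyne, if_neg hgt]
        simp only [show pvEmitTurns 0 0 = [] from by decide, List.nil_append]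
        rw [ih (y - 1) (by omega) ⟨fun h => by omega, fun _ => rfl⟩]
        simp [List.replicate_succ, List.append_assoc]

-- entering the y-phase at x = bx with exactly the remaining fuel
theorem pvWalkF_y (bx byy y d : Int) (acc : List String) (hy : y ≠ byy) :
    pvWalkF ((byy - y).natAbs) bx byy bx y d acc =
      (acc ++ pvEmitTurns d (if byy > y then 2 else 0)
           ++ List.replicate (byy - y).natAbs "forward()",
       if byy > y then 2 else 0) := by
  by_cases hgt : byy > y
  · simp only [if_pos hgt]
    rw [show (byy - y).natAbs = (byy - (y + 1)).natAbs + 1 by omega,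
      pvWalkF, if_neg (show ¬ bx ≠ bx by omega), if_pos hy, if_pos hgt,
      pvWalkF_y_run bx byy 2 ((byy - (y + 1)).natAbs) (y + 1) rfl
        ⟨fun _ => rfl, fun h => by omega⟩]
    simp [List.replicate_succ, List.append_assoc]
  · simp only [if_neg hgt]
    rw [show (byy - y).natAbs = (byy - (y - 1)).natAbs + 1 by omega,
      pvWalkF, if_neg (show ¬ bx ≠ bx by omega), if_pos hy, if_neg hgt,
      pvWalkF_y_run bx byy 0 ((byy - (y - 1)).natAbs) (y - 1) rfl
        ⟨fun h => by omega, fun _ => rfl⟩]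
    simp [List.replicate_succ, List.append_assoc]

-- ===== VERDICT (by name: the statement is the Claim_ definition above) =====
theorem generate_ptp_instructions_spec : Claim_equal_generate_ptp_instructions := by
  intro a b direction _
  show _ = _
  obtain ⟨ax, ay⟩ := a
  obtain ⟨bx, byy⟩ := b
  have hxa : (|ax - bx|).toNat = (bx - ax).natAbs := by
    rw [Int.abs_eq_natAbs, Int.toNat_natCast]; omega
  have hya : (|ay - byy|).toNat = (byy - ay).natAbs := by
    rw [Int.abs_eq_natAbs, Int.toNat_natCast]; omega
  simp only [generate_ptp_instructions, generate_ptp_instructions_alt, forward_loop_eq, hxa, hya]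
  rcases lt_trichotomy ax bx with h1 | h1 | h1 <;> rcases lt_trichotomy ay byy with h2 | h2 | h2
  · rw [pvWalkF_x bx byy ax ay direction _ [] (by omega)]
    simp only [if_pos (show bx > ax by omega)]
    rw [pvWalkF_y bx byy ay 1 _ (by omega)]
    simp only [if_pos (show byy > ay by omega), if_pos h1, if_pos h2,
      turns_eq direction 1 (by omega), turns_eq 1 2 (by omega),
      List.nil_append, List.append_assoc]
  · rw [pvWalkF_x bx byy ax ay direction _ [] (by omega)]
    simp only [if_pos (show bx > ax by omega)]
    subst h2
    rw [show (ay - ay).natAbs = 0 by omega, pvWalkF_zero]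
    simp only [if_pos h1, if_neg (lt_irrefl ay), show (ay - ay).natAbs = 0 by omega,
      turns_eq direction 1 (by omega), List.replicate_zero, List.append_nil,
      List.nil_append, List.append_assoc]
  · rw [pvWalkF_x bx byy ax ay direction _ [] (by omega)]
    simp only [if_pos (show bx > ax by omega)]
    rw [pvWalkF_y bx byy ay 1 _ (by omega)]
    simp only [if_neg (show ¬ byy > ay by omega), if_pos h1,
      if_neg (show ¬ ay < byy by omega), if_pos (show ay > byy by omega),
      turns_eq direction 1 (by omega), turns_eq 1 0 (by omega),
      List.nil_append, List.append_assoc]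
  · subst h1
    rw [show (ax - ax).natAbs + (byy - ay).natAbs = (byy - ay).natAbs by omega,
      pvWalkF_y ax byy ay direction [] (by omega)]
    simp only [if_pos (show byy > ay by omega), if_neg (lt_irrefl ax),
      show (ax - ax).natAbs = 0 by omega, if_pos h2,
      turns_eq direction 2 (by omega), List.replicate_zero,
      List.nil_append, List.append_assoc]
  · subst h1; subst h2
    rw [show (ax - ax).natAbs + (ay - ay).natAbs = 0 by omega, pvWalkF_zero]
    simp only [if_neg (lt_irrefl ax), if_neg (lt_irrefl ay),
      show (ax - ax).natAbs = 0 by omega, show (ay - ay).natAbs = 0 by omega,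
      List.replicate_zero, List.append_nil]
  · subst h1
    rw [show (ax - ax).natAbs + (byy - ay).natAbs = (byy - ay).natAbs by omega,
      pvWalkF_y ax byy ay direction [] (by omega)]
    simp only [if_neg (show ¬ byy > ay by omega), if_neg (lt_irrefl ax),
      show (ax - ax).natAbs = 0 by omega, if_neg (show ¬ ay < byy by omega),
      if_pos (show ay > byy by omega), turns_eq direction 0 (by omega),
      List.replicate_zero, List.nil_append, List.append_assoc]
  · rw [pvWalkF_x bx byy ax ay direction _ [] (by omega)]
    simp only [if_neg (show ¬ bx > ax by omega)]
    rw [pvWalkF_y bx byy ay 3 _ (by omega)]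
    simp only [if_pos (show byy > ay by omega), if_neg (show ¬ ax < bx by omega),
      if_pos (show ax > bx by omega), if_pos h2,
      turns_eq direction 3 (by omega), turns_eq 3 2 (by omega),
      List.nil_append, List.append_assoc]
  · rw [pvWalkF_x bx byy ax ay direction _ [] (by omega)]
    simp only [if_neg (show ¬ bx > ax by omega)]
    subst h2
    rw [show (ay - ay).natAbs = 0 by omega, pvWalkF_zero]
    simp only [if_neg (show ¬ ax < bx by omega), if_pos (show ax > bx by omega),
      if_neg (lt_irrefl ay), show (ay - ay).natAbs = 0 by omega,
      turns_eq direction 3 (by omega), List.replicate_zero, List.append_nil,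
      List.nil_append, List.append_assoc]
  · rw [pvWalkF_x bx byy ax ay direction _ [] (by omega)]
    simp only [if_neg (show ¬ bx > ax by omega)]
    rw [pvWalkF_y bx byy ay 3 _ (by omega)]
    simp only [if_neg (show ¬ byy > ay by omega), if_neg (show ¬ ax < bx by omega),
      if_pos (show ax > bx by omega), if_neg (show ¬ ay < byy by omega),
      if_pos (show ay > byy by omega),
      turns_eq direction 3 (by omega), turns_eq 3 0 (by omega),
      List.nil_append, List.append_assoc]
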